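-- pv_equiv track=rewrite | github.com/gord-parex/plastic_core_modules | merge_multiple_las_gas_electric_logs.py | get_associated_logs_dict
-- ===== SOURCE A (Python) =====
-- def get_associated_logs_dict(unique_log_name_list, raw_file_list):
--
--     """Get a dictionary that groups all of the ossociated logs together based
--     on which .las files in the directory contain the text string of the base
--     log name
--
--     Parameters
--     ----------
--     unique_log_name_list : list
--         The list of unique log names to reference.
--     raw_file_list : list
--         The list of raw .las filenames found in the specified logs folder.
--
--     Returns
--     -------
--     logs_name_dict : dict
--         A dictionary that relates the UWI (key) to the list of .las filenames
--         that are associated with that UWI (value).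
--
--     """
--
--
--     #Instantiate dictionary to store results
--     logs_name_dict = {}
--
--     #Loop over the unique logs (base logs) in the unique_log_name_list
--     for entry in unique_log_name_list:
--
--
--         #Instantiate list that will be associated with each key
--         logs_name_dict[entry] = []
--
--
--         for file in raw_file_list:
--
--             #Split the filename on underscore and take the first part of
--             #the filename
--             file_split_underscore = file.split('_')[0]
--             file_split_underscore_period = file_split_underscore.split('.')[0]
--
--             #If this first part of the split filename is equal to the
--             #entry, add the filename to the list
--             if (file_split_underscore_period == str(entry)):
--                   logs_name_dict[entry].append(file)
--
--
--     return logs_name_dict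
-- ===== SOURCE B (Python) =====
-- def get_associated_logs_dict(unique_log_name_list, raw_file_list):
--     """One pass over the files builds a prefix-key index; each log name is
--     then a single dict lookup (O(N+M) instead of A's O(N*M))."""
--     groups = {}
--     for file in raw_file_list:
--         key = file.split('_')[0].split('.')[0]
--         groups.setdefault(key, []).append(file)
--     return {name: list(groups.get(name, [])) for name in unique_log_name_list}
-- ===== Notes on version B (the rewrite author's own statement) =====
-- stated objective: faster
-- what changed: B indexes the files once by their underscore/period prefix key into a dict and then answers each log name with a single lookup, replacing A's rescan of the whole file list for every log name.
import Mathlib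
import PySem

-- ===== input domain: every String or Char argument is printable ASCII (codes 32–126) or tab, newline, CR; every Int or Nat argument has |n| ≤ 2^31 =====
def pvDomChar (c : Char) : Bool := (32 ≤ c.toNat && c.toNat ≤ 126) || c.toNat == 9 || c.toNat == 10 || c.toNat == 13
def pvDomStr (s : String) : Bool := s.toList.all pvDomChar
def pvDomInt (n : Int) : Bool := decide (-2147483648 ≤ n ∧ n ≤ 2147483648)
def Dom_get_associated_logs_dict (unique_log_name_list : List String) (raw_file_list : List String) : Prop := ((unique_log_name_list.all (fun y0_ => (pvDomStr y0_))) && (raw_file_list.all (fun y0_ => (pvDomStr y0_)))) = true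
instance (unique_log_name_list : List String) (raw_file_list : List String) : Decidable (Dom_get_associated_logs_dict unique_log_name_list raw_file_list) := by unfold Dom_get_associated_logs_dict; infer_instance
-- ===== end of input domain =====

-- B indexes the files once by their underscore/period prefix key and answers each log
-- name with a single dict lookup instead of A's rescan of the whole file list per name (objective: faster).


-- ===== PORT A =====
-- file.split('_')[0]: split? returns some for a nonempty separator and the list is never
-- empty, so '.getD []' / '.headD ""' are exact for the [0] index here.
def get_associated_logs_dict (unique_log_name_list : List String) (raw_file_list : List String) : List (String × List String) :=
  (unique_log_name_list.foldl (fun logs_name_dict entry =>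
      raw_file_list.foldl (fun logs_name_dict file =>
          let file_split_underscore := ((PySem.Str.split? file "_").getD []).headD ""
          let file_split_underscore_period := ((PySem.Str.split? file_split_underscore ".").getD []).headD ""
          if file_split_underscore_period == entry then
            logs_name_dict.modify entry [] (· ++ [file])
          else logs_name_dict)
        (logs_name_dict.insert entry []))
    PySem.Dict.empty).items

-- ===== PORT B =====
def pvPrefixKey (file : String) : String :=
  ((PySem.Str.split? (((PySem.Str.split? file "_").getD []).headD "") ".").getD []).headD ""

def get_associated_logs_dict_alt (unique_log_name_list : List String) (raw_file_list : List String) : List (String × List String) :=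
  let groups := raw_file_list.foldl
    (fun groups file => groups.modify (pvPrefixKey file) [] (· ++ [file]))
    (PySem.Dict.empty : PySem.Dict String (List String))
  (unique_log_name_list.foldl (fun d name => d.insert name (groups.getD name [])) PySem.Dict.empty).items

-- ===== PRECONDITION & SPEC =====
def Spec_get_associated_logs_dict (unique_log_name_list : List String) (raw_file_list : List String) (out : List (String × List String)) : Prop := out = get_associated_logs_dict_alt unique_log_name_list raw_file_list
instance (unique_log_name_list : List String) (raw_file_list : List String) (out : List (String × List String)) : Decidable (Spec_get_associated_logs_dict unique_log_name_list raw_file_list out) := by unfold Spec_get_associated_logs_dict; infer_instance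

-- ===== CLAIM (what is proved, stated in full; the proofs are below) =====
def Claim_equal_get_associated_logs_dict : Prop := ∀ (unique_log_name_list : List String) (raw_file_list : List String), Dom_get_associated_logs_dict unique_log_name_list raw_file_list → Spec_get_associated_logs_dict unique_log_name_list raw_file_list (get_associated_logs_dict unique_log_name_list raw_file_list)

-- ===== LEMMAS AND PROOFS =====

-- A's inner file loop, started on a dict where 'entry' is bound to l, just extends l
-- with the files whose prefix key is 'entry'.
theorem pv_inner_loop (entry : String) (r : List String) :
    ∀ (d : PySem.Dict String (List String)) (l : List String),
      r.foldl (fun logs_name_dict file =>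
          let file_split_underscore := ((PySem.Str.split? file "_").getD []).headD ""
          let file_split_underscore_period := ((PySem.Str.split? file_split_underscore ".").getD []).headD ""
          if file_split_underscore_period == entry then
            logs_name_dict.modify entry [] (· ++ [file])
          else logs_name_dict)
        (d.insert entry l)
      = d.insert entry (l ++ r.filter (fun f => pvPrefixKey f == entry)) := by
  induction r with
  | nil => intro d l; simp
  | cons f r ih =>
      intro d l
      by_cases h : pvPrefixKey f == entry
      · simp only [List.foldl_cons, List.filter_cons, h, if_pos]
        rw [show (((PySem.Str.split? (((PySem.Str.split? f "_").getD []).headD "") ".").getD []).headD "") = pvPrefixKey f from rfl, h]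
        simp only [if_pos]
        rw [show (d.insert entry l).modify entry [] (· ++ [f]) = d.insert entry (l ++ [f]) by
          simp [PySem.Dict.modify, PySem.Dict.getD_insert_self, PySem.Dict.insert_insert_self]]
        rw [ih d (l ++ [f]), List.append_assoc]
        simp
      · simp only [List.foldl_cons, List.filter_cons, h, if_neg]
        rw [show (((PySem.Str.split? (((PySem.Str.split? f "_").getD []).headD "") ".").getD []).headD "") = pvPrefixKey f from rfl]
        simp only [h, Bool.false_eq_true, if_false]
        rw [ih d l]

-- B's grouping pass: the bucket at c is exactly the files whose prefix key is c.
theorem pv_groups_getD (r : List String) (c : String) :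
    (r.foldl (fun groups file => groups.modify (pvPrefixKey file) [] (· ++ [file]))
        (PySem.Dict.empty : PySem.Dict String (List String))).getD c []
      = r.filter (fun f => pvPrefixKey f == c) := by
  have := PySem.Dict.getD_foldl_modify_append (l := r.map (fun f => (pvPrefixKey f, f)))
    (d := (PySem.Dict.empty : PySem.Dict String (List String))) (c := c)
  simpa [List.foldl_map, List.filter_map, Function.comp_def, List.map_map] using this

-- ===== VERDICT (by name: the statement is the Claim_ definition above) =====
theorem get_associated_logs_dict_spec : Claim_equal_get_associated_logs_dict := by
  intro u r _
  unfold Spec_get_associated_logs_dict get_associated_logs_dict get_associated_logs_dict_alt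
  congr 1
  have hf : (fun (logs_name_dict : PySem.Dict String (List String)) entry =>
      r.foldl (fun logs_name_dict file =>
          let file_split_underscore := ((PySem.Str.split? file "_").getD []).headD ""
          let file_split_underscore_period := ((PySem.Str.split? file_split_underscore ".").getD []).headD ""
          if file_split_underscore_period == entry then
            logs_name_dict.modify entry [] (· ++ [file])
          else logs_name_dict)
        (logs_name_dict.insert entry []))
    = (fun (d : PySem.Dict String (List String)) name =>
        d.insert name ((r.foldl (fun groups file => groups.modify (pvPrefixKey file) [] (· ++ [file]))
          (PySem.Dict.empty : PySem.Dict String (List String))).getD name [])) := by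
    funext d e
    rw [pv_inner_loop e r d [], pv_groups_getD r e]
    simp
  rw [hf]
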